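-- pv_equiv track=rewrite | github.com/wangyuemule/FinalGNN | codes/dataloader2.py | construct_full_edge_list
-- ===== SOURCE A (Python) =====
-- def construct_full_edge_list(nodes):
--     num_node = len(nodes)
--     edge_list = [[], []]
--     receiver_sender_list = []
--     for i in range(num_node):
--         for j in range(num_node):
--             edge_list[0].append(i)
--             edge_list[1].append(j)
--             receiver_sender_list.append([nodes[i], nodes[j]])
--
--     return edge_list, receiver_sender_list
-- ===== SOURCE B (Python) =====
-- def construct_full_edge_list(nodes):
--     # Single flat enumeration of the n*n flattened index space; each pair is
--     # recovered arithmetically as (k // n, k % n) instead of by nested loops.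
--     n = len(nodes)
--     ks = range(n * n)
--     edge_list = [[k // n for k in ks], [k % n for k in ks]]
--     receiver_sender_list = [[nodes[k // n], nodes[k % n]] for k in ks]
--     return edge_list, receiver_sender_list
-- ===== Notes on version B (the rewrite author's own statement) =====
-- stated objective: alternative
-- what changed: Replaced the fused nested loop over i,j with a single flat enumeration of the n*n index space, decoding each flattened index arithmetically as (k // n, k % n) to produce the two index rows and the node-pair list.
import Mathlib
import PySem

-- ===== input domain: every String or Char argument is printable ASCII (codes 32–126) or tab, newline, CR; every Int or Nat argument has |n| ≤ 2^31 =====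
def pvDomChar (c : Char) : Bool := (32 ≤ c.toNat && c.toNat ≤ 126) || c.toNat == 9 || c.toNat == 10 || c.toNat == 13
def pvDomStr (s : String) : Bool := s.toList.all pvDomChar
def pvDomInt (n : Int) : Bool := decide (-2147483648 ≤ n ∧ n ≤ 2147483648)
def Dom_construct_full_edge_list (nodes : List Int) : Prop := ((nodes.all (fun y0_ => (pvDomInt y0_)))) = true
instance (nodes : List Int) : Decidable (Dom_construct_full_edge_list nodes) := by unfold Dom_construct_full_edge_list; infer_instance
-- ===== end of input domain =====

-- B replaces A's fused nested i,j loop by a single flat enumeration of the n*n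
-- index space with arithmetic decoding k // n, k % n; objective: alternative.

-- ===== PORT A =====
-- A: one nested loop over range(n) × range(n), appending to three accumulators.
-- nodes[i] is ported with pyGetD; every index produced by the loop is in range,
-- so the default is never used and the port is exact.
def construct_full_edge_list (nodes : List Int) : List (List Int) × List (List Int) :=
  let num_node : Int := nodes.length
  let res :=
    (PySem.List.pyRange 0 num_node 1).foldl
      (fun st i =>
        (PySem.List.pyRange 0 num_node 1).foldl
          (fun st j =>
            (st.1 ++ [i], st.2.1 ++ [j],
             st.2.2 ++ [[PySem.List.pyGetD nodes i 0, PySem.List.pyGetD nodes j 0]]))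
          st)
      (([] : List Int), ([] : List Int), ([] : List (List Int)))
  ([res.1, res.2.1], res.2.2)

-- ===== PORT B =====
-- B: one flat pass over range(n*n); i = k // n, j = k % n recovered arithmetically.
-- All indices are in range, so pyGetD's default is never used and the port is exact.
def construct_full_edge_list_alt (nodes : List Int) : List (List Int) × List (List Int) :=
  let n : Int := nodes.length
  let ks := PySem.List.pyRange 0 (n * n) 1
  let edge_list : List (List Int) :=
    [ks.map (fun k => PySem.Int.floordiv k n), ks.map (fun k => PySem.Int.mod k n)]
  let receiver_sender_list :=
    ks.map (fun k => [PySem.List.pyGetD nodes (PySem.Int.floordiv k n) 0,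
                      PySem.List.pyGetD nodes (PySem.Int.mod k n) 0])
  (edge_list, receiver_sender_list)

-- ===== PRECONDITION & SPEC =====
def Spec_construct_full_edge_list (nodes : List Int) (out : List (List Int) × List (List Int)) : Prop := out = construct_full_edge_list_alt nodes
instance (nodes : List Int) (out : List (List Int) × List (List Int)) : Decidable (Spec_construct_full_edge_list nodes out) := by unfold Spec_construct_full_edge_list; infer_instance

-- ===== CLAIM (what is proved, stated in full; the proofs are below) =====
def Claim_equal_construct_full_edge_list : Prop := ∀ (nodes : List Int), Dom_construct_full_edge_list nodes → Spec_construct_full_edge_list nodes (construct_full_edge_list nodes)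

-- ===== LEMMAS AND PROOFS =====

-- Inner loop of A over js with fixed i.
theorem pv_inner (f : Int → Int) (i : Int) (js : List Int) (a b : List Int) (c : List (List Int)) :
    js.foldl
      (fun (st : List Int × List Int × List (List Int)) j =>
        (st.1 ++ [i], st.2.1 ++ [j], st.2.2 ++ [[f i, f j]]))
      (a, b, c)
    = (a ++ js.map (fun _ => i), b ++ js, c ++ js.map (fun j => [f i, f j])) := by
  induction js generalizing a b c with
  | nil => simp
  | cons j js ih => simp [List.foldl_cons, ih]

-- Outer loop of A over is.
theorem pv_outer (f : Int → Int) (js is : List Int) (a b : List Int) (c : List (List Int)) :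
    is.foldl
      (fun (st : List Int × List Int × List (List Int)) i =>
        js.foldl
          (fun (st : List Int × List Int × List (List Int)) j =>
            (st.1 ++ [i], st.2.1 ++ [j], st.2.2 ++ [[f i, f j]]))
          st)
      (a, b, c)
    = (a ++ is.flatMap (fun i => js.map (fun _ => i)),
       b ++ is.flatMap (fun _ => js),
       c ++ is.flatMap (fun i => js.map (fun j => [f i, f j]))) := by
  induction is generalizing a b c with
  | nil => simp
  | cons i is ih => simp [List.foldl_cons, pv_inner, ih]

-- Flat-index decoding: a map over range (a*n) with divmod decoding equals the
-- nested flatMap over range a × range n.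
theorem pv_flat {α : Type} (f : Nat → Nat → α) (a n : Nat) (hn : 0 < n) :
    (List.range (a * n)).map (fun k => f (k / n) (k % n))
    = (List.range a).flatMap (fun i => (List.range n).map (fun j => f i j)) := by
  induction a with
  | zero => simp
  | succ a ih =>
    have : (a + 1) * n = a * n + n := by ring
    rw [this, List.range_add, List.map_append, ih, List.range_succ, List.flatMap_append]
    congr 1
    simp only [List.flatMap_cons, List.flatMap_nil, List.append_nil, List.map_map]
    refine List.map_congr_left (fun j hj => ?_)
    have hjn : j < n := List.mem_range.mp hj
    have h1 : (a * n + j) / n = a := by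
      rw [Nat.mul_comm a n, Nat.mul_add_div hn, Nat.div_eq_of_lt hjn, Nat.add_zero]
    have h2 : (a * n + j) % n = j := by
      rw [Nat.mul_comm a n, Nat.mul_add_mod, Nat.mod_eq_of_lt hjn]
    simp [Function.comp, h1, h2]

theorem pv_range_cast (n : Nat) : PySem.List.pyRange 0 (n : Int) 1 = (List.range n).map Int.ofNat := by
  simp [PySem.List.pyRange_one, Int.ofNat_eq_natCast]

-- Int-level decoding lemma matching both ports' shapes.
theorem pv_decode {α : Type} (g : Int → Int → α) (n : Nat) (hn : 0 < n) :
    ((List.range (n * n)).map Int.ofNat).map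
        (fun k => g (PySem.Int.floordiv k (n : Int)) (PySem.Int.mod k (n : Int)))
    = ((List.range n).map Int.ofNat).flatMap
        (fun i => ((List.range n).map Int.ofNat).map (fun j => g i j)) := by
  rw [List.map_map, List.flatMap_map]
  have : ∀ i : Nat, (((List.range n).map Int.ofNat).map (fun j => g (Int.ofNat i) j))
      = (List.range n).map (fun j => g (Int.ofNat i) (Int.ofNat j)) := by
    intro i; rw [List.map_map]; rfl
  simp only [Function.comp_def, this]
  rw [← pv_flat (fun i j => g (Int.ofNat i) (Int.ofNat j)) n n hn]
  refine List.map_congr_left (fun k _ => ?_)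
  simp only [Int.ofNat_eq_natCast, PySem.Int.floordiv_natCast, PySem.Int.mod_natCast]

theorem construct_full_edge_list_spec : Claim_equal_construct_full_edge_list := by
  intro nodes _
  show construct_full_edge_list nodes = construct_full_edge_list_alt nodes
  rcases Nat.eq_zero_or_pos nodes.length with h0 | hn
  · rw [List.length_eq_zero_iff.mp h0]; decide
  have hcast : ((nodes.length : Int) * (nodes.length : Int))
      = ((nodes.length * nodes.length : Nat) : Int) := by push_cast; ring
  have h0 := pv_decode (fun i _ => i) nodes.length hn
  have h1 := pv_decode (fun _ j => j) nodes.length hn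
  have h2 := pv_decode
    (fun i j => [PySem.List.pyGetD nodes i 0, PySem.List.pyGetD nodes j 0]) nodes.length hn
  simp only [construct_full_edge_list, construct_full_edge_list_alt, pv_outer,
    List.nil_append, hcast, pv_range_cast, List.map_map] at *
  simp only [Function.comp_def] at *
  rw [← h0, ← h1, ← h2]
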